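-- pv_equiv track=rewrite | github.com/vespa-engine/system-test | tests/performance/raw_indexing/make_queries.py | count_terms
-- ===== SOURCE A (Python) =====
-- def count_terms(doc, term_length=1, common_words=set()):
--     terms_set = set()
--     win_len = term_length
--     for i in range(len(doc) + 1 - win_len):
--         if not any(
--             map(lambda word: word in common_words, doc[i : i + win_len])
--         ):
--             term = "+text:".join(doc[i : i + win_len])
--             terms_set.add(term)
--     return terms_set
-- ===== SOURCE B (Python) =====
-- def count_terms(doc, term_length=1, common_words=set()):
--     win = term_length
--     n = len(doc)
--     terms = set()
--     cnt = sum(1 for w in doc[:win] if w in common_words)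
--     for i in range(n + 1 - win):
--         if cnt == 0:
--             terms.add("+text:".join(doc[i:i + win]))
--         if i + win < n:
--             if doc[i] in common_words:
--                 cnt -= 1
--             if doc[i + win] in common_words:
--                 cnt += 1
--     return terms
-- ===== Notes on version B (the rewrite author's own statement) =====
-- stated objective: alternative
-- what changed: Replaces the per-window any()-scan over doc[i:i+win] with a sliding count of common words in the current window, maintained in O(1) per step (initial scan of the first window, then subtract the word leaving and add the word entering).
-- outside the precondition, e.g. on count_terms(['a', 'b', 'c'], -1, set()): A returns {'', 'a+text:b'}, B raises IndexError
import Mathlib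
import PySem

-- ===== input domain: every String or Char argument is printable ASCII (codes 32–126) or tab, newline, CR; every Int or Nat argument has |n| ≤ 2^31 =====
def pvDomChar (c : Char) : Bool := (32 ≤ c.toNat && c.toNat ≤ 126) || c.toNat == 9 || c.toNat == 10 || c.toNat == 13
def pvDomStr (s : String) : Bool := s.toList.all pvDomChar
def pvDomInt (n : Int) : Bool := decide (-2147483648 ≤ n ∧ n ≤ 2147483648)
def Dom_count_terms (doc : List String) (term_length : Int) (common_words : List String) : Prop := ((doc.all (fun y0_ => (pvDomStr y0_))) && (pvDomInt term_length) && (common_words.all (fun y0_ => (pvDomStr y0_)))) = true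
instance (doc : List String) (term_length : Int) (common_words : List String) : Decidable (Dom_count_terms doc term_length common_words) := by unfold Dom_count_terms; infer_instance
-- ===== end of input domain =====

-- B replaces A's per-window any()-scan with a sliding count of common words, updated in O(1) per shift (alternative decomposition; not claimed faster).

-- ===== PORT A =====
def count_terms (doc : List String) (term_length : Int) (common_words : List String) : List String :=
  let win := term_length
  (PySem.List.pyRange 0 ((doc.length : Int) + 1 - win) 1).foldl
    (fun terms_set i =>
      if (PySem.List.slice doc (some i) (some (i + win))).any (fun word => common_words.contains word) then
        terms_set
      else
        PySem.Set.add terms_set (PySem.Str.join "+text:" (PySem.List.slice doc (some i) (some (i + win)))))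
    (PySem.Set.empty : List String)

-- ===== PORT B =====
def count_terms_alt (doc : List String) (term_length : Int) (common_words : List String) : List String :=
  let win := term_length
  let n : Int := (doc.length : Int)
  let cnt0 : Int := ((PySem.List.slice doc none (some win)).filter (fun w => common_words.contains w)).length
  ((PySem.List.pyRange 0 (n + 1 - win) 1).foldl
    (fun (st : List String × Int) i =>
      let terms := if st.2 == 0 then
          PySem.Set.add st.1 (PySem.Str.join "+text:" (PySem.List.slice doc (some i) (some (i + win))))
        else st.1
      let cnt := if i + win < n then
          st.2 - (if common_words.contains (PySem.List.pyGetD doc i "") then 1 else 0)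
               + (if common_words.contains (PySem.List.pyGetD doc (i + win) "") then 1 else 0)
        else st.2
      (terms, cnt))
    ((PySem.Set.empty : List String), cnt0)).1

-- ===== PRECONDITION & SPEC =====
-- Pre_ excludes negative term_length, on which A's windows arise accidentally from Python's
-- negative-slice wraparound (an artifact outside the function's natural domain); B raises there.
def Pre_count_terms (doc : List String) (term_length : Int) (common_words : List String) : Prop :=
  0 ≤ term_length
instance (doc : List String) (term_length : Int) (common_words : List String) : Decidable (Pre_count_terms doc term_length common_words) := by unfold Pre_count_terms; infer_instance

def pvWitness_count_terms : List String × Int × List String := (["a", "b", "c"], 2, ["b"])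

def Spec_count_terms (doc : List String) (term_length : Int) (common_words : List String) (out : List String) : Prop := out = count_terms_alt doc term_length common_words
instance (doc : List String) (term_length : Int) (common_words : List String) (out : List String) : Decidable (Spec_count_terms doc term_length common_words out) := by unfold Spec_count_terms; infer_instance

-- ===== CLAIM (what is proved, stated in full; the proofs are below) =====
def Claim_equal_count_terms : Prop := ∀ (doc : List String) (term_length : Int) (common_words : List String), Dom_count_terms doc term_length common_words → Pre_count_terms doc term_length common_words → Spec_count_terms doc term_length common_words (count_terms doc term_length common_words)

-- ===== LEMMAS AND PROOFS =====

-- range decomposition: the mapped range over j+1 indices starting at k is ↑k followed by j indices from k+1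
lemma ct_range_cons (k j : Nat) :
    (List.range (j + 1)).map (fun t => ((k + t : Nat) : Int))
      = ((k : Nat) : Int) :: (List.range j).map (fun t => ((k + 1 + t : Nat) : Int)) := by
  simp only [List.range_succ_eq_map, List.map_cons, List.map_map, Function.comp_def,
    Nat.add_zero, List.cons.injEq, true_and]
  apply List.map_congr_left
  intro t _
  congr 1
  omega

-- sliding-window count: moving the window one step right removes doc[k] and appends doc[k+w]
lemma ct_slide (doc : List String) (p : String → Bool) (w k : Nat) (h : k + w < doc.length) :
    ((doc.drop (k + 1)).take w).countP p + (if p (doc.getD k "") then 1 else 0)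
      = ((doc.drop k).take w).countP p + (if p (doc.getD (k + w) "") then 1 else 0) := by
  have hk : k < doc.length := by omega
  cases w with
  | zero =>
      simp
  | succ v =>
      have hdrop : doc.drop k = doc[k] :: doc.drop (k + 1) := List.drop_eq_getElem_cons hk
      have htake : (doc.drop (k + 1)).take (v + 1)
          = (doc.drop (k + 1)).take v ++ ((doc.drop (k + 1))[v]?).toList := List.take_succ
      have hget : (doc.drop (k + 1))[v]? = some doc[k + (v + 1)] := by
        rw [List.getElem?_drop]
        rw [List.getElem?_eq_getElem (by omega)]
        congr 1
        congr 1
        omega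
      have hgetD1 : doc.getD k "" = doc[k] := List.getD_eq_getElem doc "" hk
      have hgetD2 : doc.getD (k + (v + 1)) "" = doc[k + (v + 1)] := List.getD_eq_getElem doc "" h
      rw [hgetD1, hgetD2, htake, hget, hdrop, List.take_succ_cons]
      simp only [List.countP_append, List.countP_cons, Option.toList_some, List.countP_nil]
      by_cases h1 : p doc[k] <;> by_cases h2 : p doc[k + (v + 1)] <;>
        simp only [h1, h2, if_true, if_false, Bool.false_eq_true, decide_true, decide_false] <;> omega

-- main loop invariant: A's fold over the remaining indices equals the first component of B's fold,
-- provided B's count equals the number of common words in the current window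
lemma ct_loop (doc common_words : List String) (w : Nat) :
    ∀ (j k : Nat) (terms : List String),
      (j = 0 ∨ k + j + w ≤ doc.length + 1) →
      ((List.range j).map (fun t => ((k + t : Nat) : Int))).foldl
        (fun terms_set i =>
          if (PySem.List.slice doc (some i) (some (i + (w : Int)))).any (fun word => common_words.contains word) then
            terms_set
          else
            PySem.Set.add terms_set (PySem.Str.join "+text:" (PySem.List.slice doc (some i) (some (i + (w : Int)))))) terms
      = (((List.range j).map (fun t => ((k + t : Nat) : Int))).foldl
          (fun (st : List String × Int) i =>
            let terms := if st.2 == 0 then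
                PySem.Set.add st.1 (PySem.Str.join "+text:" (PySem.List.slice doc (some i) (some (i + (w : Int)))))
              else st.1
            let cnt := if i + (w : Int) < (doc.length : Int) then
                st.2 - (if common_words.contains (PySem.List.pyGetD doc i "") then 1 else 0)
                     + (if common_words.contains (PySem.List.pyGetD doc (i + (w : Int)) "") then 1 else 0)
              else st.2
            (terms, cnt))
          (terms, (((doc.drop k).take w).countP (fun s => common_words.contains s) : Int))).1 := by
  intro j
  induction j with
  | zero => intro k terms _; simp
  | succ j ih =>
      intro k terms hj
      rw [ct_range_cons]
      simp only [List.foldl_cons]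
      have hwin : PySem.List.slice doc (some ((k : Nat) : Int)) (some (((k : Nat) : Int) + (w : Int)))
          = (doc.drop k).take w := by
        have := PySem.List.slice_natCast_add doc k w
        exact_mod_cast this
      set c : Nat := ((doc.drop k).take w).countP (fun s => common_words.contains s) with hc
      -- the terms produced by the first step agree
      have hterms :
          (if (PySem.List.slice doc (some ((k:Nat):Int)) (some (((k:Nat):Int) + (w : Int)))).any (fun word => common_words.contains word) then terms
           else PySem.Set.add terms (PySem.Str.join "+text:" (PySem.List.slice doc (some ((k:Nat):Int)) (some (((k:Nat):Int) + (w : Int))))))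
          = (if ((c : Int) == 0) = true then
              PySem.Set.add terms (PySem.Str.join "+text:" (PySem.List.slice doc (some ((k:Nat):Int)) (some (((k:Nat):Int) + (w : Int)))))
             else terms) := by
        by_cases h0 : c = 0
        · have hany : (PySem.List.slice doc (some ((k:Nat):Int)) (some (((k:Nat):Int) + (w : Int)))).any (fun word => common_words.contains word) = false := by
            rw [hwin, List.any_eq_false]
            intro x hx
            have := List.countP_eq_zero.mp h0 x hx
            simpa using this
          rw [if_neg (by rw [hany]; exact Bool.false_ne_true), if_pos (by simp [h0])]
        · have hpos : 0 < c := Nat.pos_of_ne_zero h0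
          have hany : (PySem.List.slice doc (some ((k:Nat):Int)) (some (((k:Nat):Int) + (w : Int)))).any (fun word => common_words.contains word) = true := by
            rw [hwin, List.any_eq_true]
            obtain ⟨x, hx, hpx⟩ := List.countP_pos_iff.mp (hc ▸ hpos)
            exact ⟨x, hx, hpx⟩
          rw [if_pos hany, if_neg (by simp [h0])]
      rcases Nat.eq_zero_or_pos j with hj0 | hjpos
      · subst hj0
        simp only [List.range_zero, List.map_nil, List.foldl_nil]
        exact hterms
      · have hguard : ((k : Nat) : Int) + (w : Int) < (doc.length : Int) := by
          rcases hj with h | h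
          · omega
          · push_cast
            omega
        have hkw : k + w < doc.length := by exact_mod_cast hguard
        have hcnt : (c : Int)
            - (if common_words.contains (PySem.List.pyGetD doc ((k:Nat):Int) "") then 1 else 0)
            + (if common_words.contains (PySem.List.pyGetD doc (((k:Nat):Int) + (w : Int)) "") then 1 else 0)
            = (((doc.drop (k + 1)).take w).countP (fun s => common_words.contains s) : Int) := by
          have hcast : ((k:Nat):Int) + (w : Int) = (((k + w : Nat)) : Int) := by push_cast; ring
          rw [hcast, PySem.List.pyGetD_natCast, PySem.List.pyGetD_natCast]
          have := ct_slide doc (fun s => common_words.contains s) w k hkw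
          by_cases h1 : common_words.contains (doc.getD k "") <;>
            by_cases h2 : common_words.contains (doc.getD (k + w) "") <;>
            simp only [h1, h2, if_true, if_false, Bool.false_eq_true] at this ⊢ <;> omega
        rw [if_pos hguard, hcnt, ← hterms]
        exact ih (k + 1) _ (Or.inr (by omega))

-- ===== VERDICT (by name: the statement is the Claim_ definition above) =====
theorem count_terms_spec : Claim_equal_count_terms := by
  intro doc term_length common_words _hdom hpre
  unfold Spec_count_terms count_terms count_terms_alt
  obtain ⟨w, rfl⟩ : ∃ w : Nat, term_length = (w : Int) :=
    ⟨term_length.toNat, (Int.toNat_of_nonneg hpre).symm⟩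
  simp only []
  have hrange : PySem.List.pyRange 0 ((doc.length : Int) + 1 - (w : Int)) 1
      = (List.range (((doc.length : Int) + 1 - (w : Int)) - 0).toNat).map (fun t => ((0 + t : Nat) : Int)) := by
    rw [PySem.List.pyRange_one]
    apply List.map_congr_left
    intro t _
    push_cast
    ring
  have hcnt0 : (((PySem.List.slice doc none (some (w : Int))).filter (fun s => common_words.contains s)).length : Int)
      = (((doc.drop 0).take w).countP (fun s => common_words.contains s) : Int) := by
    rw [PySem.List.slice_to_natCast]
    rw [← List.countP_eq_length_filter]
    simp
  rw [hrange, hcnt0]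
  apply ct_loop doc common_words w (((doc.length : Int) + 1 - (w : Int)) - 0).toNat 0
  omega
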